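-- pv_equiv track=rewrite | github.com/S-Christensen/cartographersStudy | scoringCards.py | heartoftheforest
-- ===== SOURCE A (Python) =====
-- def is_surrounded_by_forest_or_edge(grid, r, c):
--     rows = len(grid)
--     cols = len(grid[0])
--     surroundings = [
--         (r - 1, c),  # above
--         (r + 1, c),  # below
--         (r, c - 1),  # left
--         (r, c + 1)  # right
--     ]
--
--     for nr, nc in surroundings:
--         if 0 <= nr < rows and 0 <= nc < cols:
--             if grid[nr][nc] != "forest":
--                 return False
--         else:  # Out of bounds, considered as edge of the map
--             continue
--     return True
--
-- def heartoftheforest(grid):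
--     count = 0
--     for r in range(len(grid)):
--         for c in range(len(grid[0])):
--             if grid[r][c] == "forest":
--                 if is_surrounded_by_forest_or_edge(grid, r, c):
--                     count += 1
--     return count*2
-- ===== SOURCE B (Python) =====
-- def heartoftheforest(grid):
--     if not grid:
--         return 0
--     rows, cols = len(grid), len(grid[0])
--     bad = set()
--     for r in range(rows):
--         for c in range(cols):
--             if grid[r][c] != "forest":
--                 for nb in ((r - 1, c), (r + 1, c), (r, c - 1), (r, c + 1)):
--                     if 0 <= nb[0] < rows and 0 <= nb[1] < cols:
--                         bad.add(nb)
--     return 2 * sum(1 for r in range(rows) for c in range(cols)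
--                    if grid[r][c] == "forest" and (r, c) not in bad)
-- ===== Notes on version B (the rewrite author's own statement) =====
-- stated objective: alternative
-- what changed: Instead of probing each forest cell's four neighbours, B makes one pass marking the in-bounds neighbours of every non-forest cell in a 'disqualified' set and then counts the unmarked forest cells; an explicit empty-grid guard replaces A's accidental reliance on the empty range.
import Mathlib
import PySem

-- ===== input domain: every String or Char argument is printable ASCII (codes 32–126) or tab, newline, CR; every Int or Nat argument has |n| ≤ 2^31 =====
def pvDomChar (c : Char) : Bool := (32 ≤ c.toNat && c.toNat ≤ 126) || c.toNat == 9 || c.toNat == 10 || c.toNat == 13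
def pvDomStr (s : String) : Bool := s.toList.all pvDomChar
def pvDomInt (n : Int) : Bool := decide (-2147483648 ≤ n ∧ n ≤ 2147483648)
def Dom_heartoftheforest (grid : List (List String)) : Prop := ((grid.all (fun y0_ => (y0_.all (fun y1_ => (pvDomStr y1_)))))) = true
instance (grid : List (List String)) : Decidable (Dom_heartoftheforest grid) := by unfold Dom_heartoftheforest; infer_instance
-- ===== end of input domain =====

-- B replaces A's per-forest-cell neighbour probing with one pass that marks the in-bounds
-- neighbours of every non-forest cell in a set and then counts the unmarked forest cells
-- (alternative decomposition, same asymptotic cost).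


-- ===== PORT A =====
-- grid[r][c]; total form of the Python indexing (shared by both ports), exact under Pre_heartoftheforest
def pvCellA (grid : List (List String)) (r c : Int) : String :=
  PySem.List.pyGetD (PySem.List.pyGetD grid r []) c ""

-- is_surrounded_by_forest_or_edge: the early-return loop over the 4 neighbours is `.all`
def pvIsSurrounded (grid : List (List String)) (r c : Int) : Bool :=
  let rows : Int := grid.length
  let cols : Int := (PySem.List.pyGetD grid 0 []).length
  [(r - 1, c), (r + 1, c), (r, c - 1), (r, c + 1)].all fun nb =>
    if 0 ≤ nb.1 ∧ nb.1 < rows ∧ 0 ≤ nb.2 ∧ nb.2 < cols then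
      decide (pvCellA grid nb.1 nb.2 = "forest")
    else true

def heartoftheforest (grid : List (List String)) : Int :=
  let count : Int :=
    (PySem.List.pyRange 0 (grid.length : Int) 1).foldl (fun count r =>
      (PySem.List.pyRange 0 ((PySem.List.pyGetD grid 0 []).length : Int) 1).foldl (fun count c =>
        if pvCellA grid r c = "forest" then
          if pvIsSurrounded grid r c then count + 1 else count
        else count) count) 0
  count * 2

-- ===== PORT B =====
-- the 'disqualified' set: in-bounds neighbours of every non-forest cell
def pvBad (grid : List (List String)) (rows cols : Int) : PySem.Set (Int × Int) :=
  (PySem.List.pyRange 0 rows 1).foldl (fun bad r =>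
    (PySem.List.pyRange 0 cols 1).foldl (fun bad c =>
      if pvCellA grid r c = "forest" then bad
      else [(r - 1, c), (r + 1, c), (r, c - 1), (r, c + 1)].foldl (fun bad nb =>
        if 0 ≤ nb.1 ∧ nb.1 < rows ∧ 0 ≤ nb.2 ∧ nb.2 < cols then PySem.Set.add bad nb
        else bad) bad) bad) PySem.Set.empty

def heartoftheforest_alt (grid : List (List String)) : Int :=
  if grid = [] then 0
  else
    let rows : Int := grid.length
    let cols : Int := (grid.headD []).length
    let bad := pvBad grid rows cols
    2 * ((PySem.List.pyRange 0 rows 1).map (fun r =>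
          (((PySem.List.pyRange 0 cols 1).countP (fun c =>
            decide (pvCellA grid r c = "forest" ∧ (r, c) ∉ bad))) : Int))).sum

-- ===== PRECONDITION & SPEC =====
-- Pre_ excludes ragged grids whose non-first rows are shorter than the first row:
-- there Python A raises IndexError on grid[r][c] / grid[nr][nc].
def Pre_heartoftheforest (grid : List (List String)) : Prop :=
  ∀ row ∈ grid, (grid.headD []).length ≤ row.length
instance (grid : List (List String)) : Decidable (Pre_heartoftheforest grid) := by
  unfold Pre_heartoftheforest; infer_instance

def pvWitness_heartoftheforest : List (List String) :=
  [["forest", "plain"], ["forest", "forest"]]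

def Spec_heartoftheforest (grid : List (List String)) (out : Int) : Prop := out = heartoftheforest_alt grid
instance (grid : List (List String)) (out : Int) : Decidable (Spec_heartoftheforest grid out) := by unfold Spec_heartoftheforest; infer_instance

-- ===== CLAIM (what is proved, stated in full; the proofs are below) =====
def Claim_equal_heartoftheforest : Prop := ∀ (grid : List (List String)), Dom_heartoftheforest grid → Pre_heartoftheforest grid → Spec_heartoftheforest grid (heartoftheforest grid)

-- ===== LEMMAS AND PROOFS =====

-- generic foldl-membership: if every step adds exactly the elements described by Q,
-- the folded set contains s's elements plus those contributed by some list element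
theorem pv_mem_foldl {β : Type} (l : List β)
    (step : PySem.Set (Int × Int) → β → PySem.Set (Int × Int))
    (Q : β → (Int × Int) → Prop)
    (h : ∀ s b x, x ∈ step s b ↔ x ∈ s ∨ Q b x)
    (s : PySem.Set (Int × Int)) (x : Int × Int) :
    x ∈ l.foldl step s ↔ x ∈ s ∨ ∃ b ∈ l, Q b x := by
  induction l generalizing s with
  | nil => simp
  | cons b t ih =>
      simp only [List.foldl_cons, ih, h s b x, List.mem_cons]
      constructor
      · rintro ((hs | hq) | ⟨b', hb', hq'⟩)
        · exact Or.inl hs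
        · exact Or.inr ⟨b, Or.inl rfl, hq⟩
        · exact Or.inr ⟨b', Or.inr hb', hq'⟩
      · rintro (hs | ⟨b', (rfl | hb'), hq'⟩)
        · exact Or.inl (Or.inl hs)
        · exact Or.inl (Or.inr hq')
        · exact Or.inr ⟨b', hb', hq'⟩

-- membership in the innermost neighbour-adding loop
theorem pv_mem_inner (rows cols : Int)
    (nbs : List (Int × Int)) (s : PySem.Set (Int × Int)) (x : Int × Int) :
    x ∈ nbs.foldl (fun bad nb =>
        if 0 ≤ nb.1 ∧ nb.1 < rows ∧ 0 ≤ nb.2 ∧ nb.2 < cols then PySem.Set.add bad nb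
        else bad) s ↔
      x ∈ s ∨ ∃ nb ∈ nbs, (0 ≤ nb.1 ∧ nb.1 < rows ∧ 0 ≤ nb.2 ∧ nb.2 < cols) ∧ x = nb := by
  refine pv_mem_foldl nbs _ (fun nb x => (0 ≤ nb.1 ∧ nb.1 < rows ∧ 0 ≤ nb.2 ∧ nb.2 < cols) ∧ x = nb) ?_ s x
  intro s nb x
  split_ifs with hb
  · simp only [PySem.Set.mem_add]
    tauto
  · tauto

-- full characterisation of the disqualified set
theorem pv_mem_bad (grid : List (List String)) (rows cols : Int) (x : Int × Int) :
    x ∈ pvBad grid rows cols ↔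
      ∃ r ∈ PySem.List.pyRange 0 rows 1, ∃ c ∈ PySem.List.pyRange 0 cols 1,
        pvCellA grid r c ≠ "forest" ∧
        (0 ≤ x.1 ∧ x.1 < rows ∧ 0 ≤ x.2 ∧ x.2 < cols) ∧
        x ∈ [(r - 1, c), (r + 1, c), (r, c - 1), (r, c + 1)] := by
  unfold pvBad
  rw [pv_mem_foldl _ _ (fun r x =>
    ∃ c ∈ PySem.List.pyRange 0 cols 1,
      pvCellA grid r c ≠ "forest" ∧
      (0 ≤ x.1 ∧ x.1 < rows ∧ 0 ≤ x.2 ∧ x.2 < cols) ∧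
      x ∈ [(r - 1, c), (r + 1, c), (r, c - 1), (r, c + 1)]) ?_]
  · simp [PySem.Set.empty]
  · intro s r x
    rw [pv_mem_foldl _ _ (fun c x =>
      pvCellA grid r c ≠ "forest" ∧
      (0 ≤ x.1 ∧ x.1 < rows ∧ 0 ≤ x.2 ∧ x.2 < cols) ∧
      x ∈ [(r - 1, c), (r + 1, c), (r, c - 1), (r, c + 1)]) ?_]
    intro s c x
    split_ifs with hf
    · simp [hf]
    · rw [pv_mem_inner]
      constructor
      · rintro (hs | ⟨nb, hnb, hb, rfl⟩)
        · exact Or.inl hs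
        · exact Or.inr ⟨hf, hb, hnb⟩
      · rintro (hs | ⟨_, hb, hnb⟩)
        · exact Or.inl hs
        · exact Or.inr ⟨x, hnb, hb, rfl⟩

-- the neighbour relation is symmetric
theorem pv_nb_symm (r c r' c' : Int) :
    (r, c) ∈ [(r' - 1, c'), (r' + 1, c'), (r', c' - 1), (r', c' + 1)] ↔
    (r', c') ∈ [(r - 1, c), (r + 1, c), (r, c - 1), (r, c + 1)] := by
  simp only [List.mem_cons, List.not_mem_nil, or_false, Prod.mk.injEq]
  omega

-- for an in-bounds cell: surrounded-by-forest-or-edge ⟺ not disqualified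
theorem pv_surround_iff_not_bad (grid : List (List String)) (r c : Int)
    (hr : 0 ≤ r ∧ r < (grid.length : Int))
    (hc : 0 ≤ c ∧ c < ((PySem.List.pyGetD grid 0 []).length : Int)) :
    pvIsSurrounded grid r c = true ↔
      (r, c) ∉ pvBad grid (grid.length : Int) ((PySem.List.pyGetD grid 0 []).length : Int) := by
  simp only [pvIsSurrounded, List.all_eq_true]
  constructor
  · intro hall hbad
    rw [pv_mem_bad] at hbad
    obtain ⟨r', hr', c', hc', hnf, _, hmem⟩ := hbad
    rw [pv_nb_symm] at hmem
    have h2 := hall (r', c') hmem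
    rw [PySem.List.mem_pyRange_one] at hr' hc'
    rw [if_pos (show (0:Int) ≤ (r', c').1 ∧ (r', c').1 < (grid.length : Int) ∧
        (0:Int) ≤ (r', c').2 ∧ (r', c').2 < ((PySem.List.pyGetD grid 0 []).length : Int) from
        ⟨hr'.1, hr'.2, hc'.1, hc'.2⟩)] at h2
    exact hnf (of_decide_eq_true h2)
  · intro hnb nb hmem
    split_ifs with hb
    · apply decide_eq_true
      by_contra hnf
      apply hnb
      rw [pv_mem_bad]
      refine ⟨nb.1, ?_, nb.2, ?_, ?_, ⟨hr.1, hr.2, hc.1, hc.2⟩, ?_⟩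
      · rw [PySem.List.mem_pyRange_one]; exact ⟨hb.1, hb.2.1⟩
      · rw [PySem.List.mem_pyRange_one]; exact ⟨hb.2.2.1, hb.2.2.2⟩
      · exact hnf
      · rw [pv_nb_symm]; simpa using hmem
    · trivial

-- A's nested counting loop as a sum of per-row counts
theorem pv_A_as_sum (grid : List (List String)) :
    heartoftheforest grid =
      ((PySem.List.pyRange 0 (grid.length : Int) 1).map (fun r =>
        (((PySem.List.pyRange 0 ((PySem.List.pyGetD grid 0 []).length : Int) 1).countP (fun c =>
          decide (pvCellA grid r c = "forest" ∧ pvIsSurrounded grid r c = true))) : Int))).sum * 2 := by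
  have hinner : ∀ (r : Int) (a : Int),
      (PySem.List.pyRange 0 ((PySem.List.pyGetD grid 0 []).length : Int) 1).foldl (fun count c =>
        if pvCellA grid r c = "forest" then
          if pvIsSurrounded grid r c then count + 1 else count
        else count) a =
      a + (((PySem.List.pyRange 0 ((PySem.List.pyGetD grid 0 []).length : Int) 1).countP (fun c =>
          decide (pvCellA grid r c = "forest" ∧ pvIsSurrounded grid r c = true))) : Int) := by
    intro r a
    rw [show (fun (count : Int) c =>
        if pvCellA grid r c = "forest" then
          if pvIsSurrounded grid r c then count + 1 else count
        else count) = (fun (count : Int) c =>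
        if pvCellA grid r c = "forest" ∧ pvIsSurrounded grid r c = true then count + 1 else count)
      from funext fun count => funext fun c => by split_ifs <;> tauto]
    exact PySem.List.foldl_ite_add_one _ _ _
  simp only [heartoftheforest]
  congr 1
  rw [show (fun (count : Int) r =>
      (PySem.List.pyRange 0 ((PySem.List.pyGetD grid 0 []).length : Int) 1).foldl (fun count c =>
        if pvCellA grid r c = "forest" then
          if pvIsSurrounded grid r c then count + 1 else count
        else count) count) = (fun (count : Int) r =>
      count + (((PySem.List.pyRange 0 ((PySem.List.pyGetD grid 0 []).length : Int) 1).countP (fun c =>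
          decide (pvCellA grid r c = "forest" ∧ pvIsSurrounded grid r c = true))) : Int))
    from funext fun count => funext fun r => hinner r count]
  rw [PySem.List.foldl_add]
  simp

-- ===== VERDICT (by name: the statement is the Claim_ definition above) =====
theorem heartoftheforest_spec : Claim_equal_heartoftheforest := by
  intro grid _ _
  unfold Spec_heartoftheforest
  rw [pv_A_as_sum]
  simp only [heartoftheforest_alt]
  split_ifs with hnil
  · subst hnil; simp [PySem.List.pyRange]
  · have hcols : ((grid.headD []).length : Int) = ((PySem.List.pyGetD grid 0 []).length : Int) := by
      cases grid with
      | nil => exact absurd rfl hnil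
      | cons h t => simp [PySem.List.pyGetD_zero_cons]
    simp only [hcols]
    rw [Int.mul_comm]
    congr 1
    refine congrArg List.sum (List.map_congr_left ?_)
    intro r hrmem
    refine congrArg _ (List.countP_congr ?_)
    intro c hcmem
    rw [PySem.List.mem_pyRange_one] at hrmem hcmem
    simp only [decide_eq_true_eq]
    exact and_congr_right fun _ =>
      pv_surround_iff_not_bad grid r c ⟨hrmem.1, hrmem.2⟩ ⟨hcmem.1, hcmem.2⟩
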